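-- pv_equiv track=rewrite | github.com/PeiJY/LLR-BC | CVRP/LLRBC-POMO/compare_paper.py | find_next_indices
-- ===== SOURCE A (Python) =====
-- import bisect
--
-- def find_next_indices(sorted_values, checkpoints):
--     result = []
--     for cp in checkpoints:
--         idx = bisect.bisect_left(sorted_values, cp)
--         if idx < len(sorted_values):
--             result.append(idx)
--         else:
--             result.append(None)
--     return result
-- ===== SOURCE B (Python) =====
-- def find_next_indices(sorted_values, checkpoints):
--     n = len(sorted_values)
--
--     def insertion_point(cp, lo, hi):
--         if lo >= hi:
--             return lo
--         mid = (lo + hi) // 2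
--         if sorted_values[mid] < cp:
--             return insertion_point(cp, mid + 1, hi)
--         return insertion_point(cp, lo, mid)
--
--     cache = {}
--     out = []
--     for cp in checkpoints:
--         if cp not in cache:
--             cache[cp] = insertion_point(cp, 0, n)
--         idx = cache[cp]
--         out.append(idx if idx < n else None)
--     return out
-- ===== Notes on version B (the rewrite author's own statement) =====
-- stated objective: alternative
-- what changed: Replaced the per-checkpoint call to the library's iterative bisect_left by an explicit recursive binary search, and added a dict memo over checkpoints so the search runs only once per distinct checkpoint value.
import Mathlib
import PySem

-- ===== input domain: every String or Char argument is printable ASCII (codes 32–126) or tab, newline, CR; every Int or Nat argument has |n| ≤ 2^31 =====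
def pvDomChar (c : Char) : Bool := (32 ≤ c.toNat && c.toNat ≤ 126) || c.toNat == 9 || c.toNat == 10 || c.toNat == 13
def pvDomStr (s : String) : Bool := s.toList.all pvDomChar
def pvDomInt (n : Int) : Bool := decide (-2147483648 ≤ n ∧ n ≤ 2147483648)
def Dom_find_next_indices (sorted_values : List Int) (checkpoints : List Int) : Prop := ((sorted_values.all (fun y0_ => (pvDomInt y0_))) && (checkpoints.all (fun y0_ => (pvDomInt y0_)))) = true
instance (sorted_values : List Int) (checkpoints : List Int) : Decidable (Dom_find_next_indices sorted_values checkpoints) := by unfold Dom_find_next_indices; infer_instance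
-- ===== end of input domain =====

-- B replaces the library's iterative bisect_left with an explicit recursive binary search and
-- memoizes repeated checkpoints in a dict, searching once per distinct checkpoint; objective: alternative.

-- ===== PORT A =====
-- result = []; for cp in checkpoints: idx = bisect.bisect_left(...); append idx or None
def find_next_indices (sorted_values : List Int) (checkpoints : List Int) : List (Option Int) :=
  checkpoints.foldl
    (fun result cp =>
      let idx := PySem.List.bisectLeft sorted_values cp
      if idx < sorted_values.length then result ++ [some (idx : Int)] else result ++ [none])
    []

-- ===== PORT B =====
-- def insertion_point(cp, lo, hi): recursive halving; all reachable calls from (0, n) keep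
-- lo ≤ mid < hi ≤ n, so Python's sorted_values[mid] never raises: the `none` arm of the
-- range-checked probe is unreachable and returns lo.
def pvInsertionPoint (sorted_values : List Int) (cp : Int) (lo hi : Nat) : Nat :=
  if lo ≥ hi then lo
  else
    let mid := (lo + hi) / 2
    match sorted_values[mid]? with
    | some y =>
        if y < cp then pvInsertionPoint sorted_values cp (mid + 1) hi
        else pvInsertionPoint sorted_values cp lo mid
    | none => lo
termination_by hi - lo
decreasing_by all_goals omega

-- cache = {}; out = []; for cp in checkpoints: if cp not in cache: cache[cp] = insertion_point(cp, 0, n);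
-- idx = cache[cp]; out.append(idx if idx < n else None)
-- (`cp not in cache` is ported as get? = none; `cache[cp]` cannot raise — the key was just
-- inserted if missing — so the `none` arm of the lookup is unreachable and appends nothing.)
def find_next_indices_alt (sorted_values : List Int) (checkpoints : List Int) : List (Option Int) :=
  let n := sorted_values.length
  (checkpoints.foldl
    (fun st cp =>
      let cache :=
        if PySem.Dict.get? st.1 cp = none
        then PySem.Dict.insert st.1 cp (pvInsertionPoint sorted_values cp 0 n)
        else st.1
      match PySem.Dict.get? cache cp with
      | some idx => (cache, st.2 ++ [if idx < n then some (idx : Int) else none])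
      | none => (cache, st.2))
    ((PySem.Dict.empty : PySem.Dict Int Nat), ([] : List (Option Int)))).2

-- ===== PRECONDITION & SPEC =====
def Spec_find_next_indices (sorted_values : List Int) (checkpoints : List Int) (out : List (Option Int)) : Prop := out = find_next_indices_alt sorted_values checkpoints
instance (sorted_values : List Int) (checkpoints : List Int) (out : List (Option Int)) : Decidable (Spec_find_next_indices sorted_values checkpoints out) := by unfold Spec_find_next_indices; infer_instance

-- ===== CLAIM (what is proved, stated in full; the proofs are below) =====
def Claim_equal_find_next_indices : Prop := ∀ (sorted_values : List Int) (checkpoints : List Int), Dom_find_next_indices sorted_values checkpoints → Spec_find_next_indices sorted_values checkpoints (find_next_indices sorted_values checkpoints)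

-- ===== LEMMAS AND PROOFS =====

-- The recursive halving performs exactly the probes of the fueled bisect loop.
theorem pvIP_eq_loop (sv : List Int) (cp : Int) :
    ∀ (fuel lo hi : Nat), hi - lo ≤ fuel →
      pvInsertionPoint sv cp lo hi = PySem.List.bisectLeftLoop sv cp fuel lo hi := by
  intro fuel
  induction fuel with
  | zero =>
    intro lo hi h
    rw [pvInsertionPoint]
    simp [PySem.List.bisectLeftLoop]
    omega
  | succ f ih =>
    intro lo hi h
    rw [pvInsertionPoint]
    rw [PySem.List.bisectLeftLoop]
    by_cases hlt : lo < hi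
    · simp only [if_pos hlt, if_neg (by omega : ¬ lo ≥ hi)]
      cases hget : sv[(lo + hi) / 2]? with
      | none => simp
      | some y =>
        simp only []
        by_cases hy : y < cp
        · simp only [if_pos hy]
          exact ih ((lo + hi) / 2 + 1) hi (by omega)
        · simp only [if_neg hy]
          exact ih lo ((lo + hi) / 2) (by omega)
    · simp [if_neg hlt, if_pos (by omega : lo ≥ hi)]

-- bisect_left(sorted_values, cp) is the full-range recursive search.
theorem pvBisect_eq_ip (sv : List Int) (cp : Int) :
    PySem.List.bisectLeft sv cp = pvInsertionPoint sv cp 0 sv.length := by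
  rw [PySem.List.bisectLeft]
  exact (pvIP_eq_loop sv cp sv.length 0 sv.length (by omega)).symm

-- per-checkpoint answer, shared by both sides
def pvF (sv : List Int) (cp : Int) : Option Int :=
  if pvInsertionPoint sv cp 0 sv.length < sv.length
  then some ((pvInsertionPoint sv cp 0 sv.length : Nat) : Int) else none

-- A's append-fold is the map of pvF.
theorem pvA_gen (sv : List Int) :
    ∀ (cps : List Int) (acc : List (Option Int)),
      List.foldl
        (fun result cp =>
          let idx := PySem.List.bisectLeft sv cp
          if idx < sv.length then result ++ [some (idx : Int)] else result ++ [none])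
        acc cps = acc ++ cps.map (pvF sv) := by
  intro cps
  induction cps with
  | nil => intro acc; simp
  | cons c t ih =>
    intro acc
    simp only [List.foldl_cons, List.map_cons]
    rw [pvBisect_eq_ip]
    by_cases h : pvInsertionPoint sv c 0 sv.length < sv.length <;>
      simp [h, ih, pvF]

-- B's fold with the cache invariant: every cached value is the full-range search result,
-- so the output component is the map of pvF.
theorem pvB_gen (sv : List Int) :
    ∀ (cps : List Int) (cache : PySem.Dict Int Nat) (acc : List (Option Int)),
      (∀ (c : Int) (v : Nat), PySem.Dict.get? cache c = some v → v = pvInsertionPoint sv c 0 sv.length) →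
      (cps.foldl
        (fun st cp =>
          let cache' :=
            if PySem.Dict.get? st.1 cp = none
            then PySem.Dict.insert st.1 cp (pvInsertionPoint sv cp 0 sv.length)
            else st.1
          match PySem.Dict.get? cache' cp with
          | some idx => (cache', st.2 ++ [if idx < sv.length then some (idx : Int) else none])
          | none => (cache', st.2))
        (cache, acc)).2 = acc ++ cps.map (pvF sv) := by
  intro cps
  induction cps with
  | nil => intro cache acc _; simp
  | cons cp t ih =>
    intro cache acc hinv
    simp only [List.foldl_cons, List.map_cons]
    by_cases hmiss : PySem.Dict.get? cache cp = none
    · rw [if_pos hmiss]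
      have hins : PySem.Dict.get? (PySem.Dict.insert cache cp (pvInsertionPoint sv cp 0 sv.length)) cp
          = some (pvInsertionPoint sv cp 0 sv.length) := PySem.Dict.get?_insert_self cache cp _
      rw [hins]
      have hinv' : ∀ (c : Int) (v : Nat),
          PySem.Dict.get? (PySem.Dict.insert cache cp (pvInsertionPoint sv cp 0 sv.length)) c = some v →
          v = pvInsertionPoint sv c 0 sv.length := by
        intro c v hc
        by_cases hcc : c = cp
        · subst hcc
          rw [PySem.Dict.get?_insert_self] at hc
          exact (Option.some_inj.mp hc).symm
        · rw [PySem.Dict.get?_insert_of_ne cache _ hcc] at hc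
          exact hinv c v hc
      rw [ih _ _ hinv']
      simp [pvF]
    · rw [if_neg hmiss]
      cases hhit : PySem.Dict.get? cache cp with
      | none => exact absurd hhit hmiss
      | some v =>
        have hv := hinv cp v hhit
        subst hv
        rw [ih _ _ hinv]
        simp [pvF]

-- empty cache satisfies the invariant
theorem pvEmpty_inv (sv : List Int) :
    ∀ (c : Int) (v : Nat),
      PySem.Dict.get? (PySem.Dict.empty : PySem.Dict Int Nat) c = some v →
      v = pvInsertionPoint sv c 0 sv.length := by
  intro c v h
  simp [PySem.Dict.get?, PySem.Dict.empty] at h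

-- ===== VERDICT (by name: the statement is the Claim_ definition above) =====
theorem find_next_indices_spec : Claim_equal_find_next_indices := by
  intro sv cps _
  unfold Spec_find_next_indices find_next_indices find_next_indices_alt
  rw [pvA_gen sv cps [], pvB_gen sv cps _ [] (pvEmpty_inv sv)]
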